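-- pv_equiv track=rewrite | github.com/yyoosshhibb/Coding | 02_FH/01_DCD/python/ZyboClient/fpgaRegs.py | _create_mask
-- ===== SOURCE A (Python) =====
-- def _create_mask(regslice):
--     slice_start = int(regslice[1])
--     slice_stop = int(regslice[0])
--     mask=0
--     for i in range(32):
--         if i >= slice_start and i <= slice_stop:
--             mask |= 1 << i
--     return mask,slice_start
-- ===== SOURCE B (Python) =====
-- def _create_mask(regslice):
--     slice_start = int(regslice[1])
--     slice_stop = int(regslice[0])
--     lo = max(slice_start, 0)
--     hi = min(slice_stop, 31)
--     if hi < lo: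
--         mask = 0
--     else:
--         mask = ((1 << (hi - lo + 1)) - 1) << lo
--     return mask, slice_start
-- ===== Notes on version B (the rewrite author's own statement) =====
-- stated objective: simpler
-- what changed: Replaces the 32-iteration bit-by-bit OR loop with a closed-form mask: clamp the window to the register width and shift a block of ones into place (zero for an empty window).
import Mathlib
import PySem

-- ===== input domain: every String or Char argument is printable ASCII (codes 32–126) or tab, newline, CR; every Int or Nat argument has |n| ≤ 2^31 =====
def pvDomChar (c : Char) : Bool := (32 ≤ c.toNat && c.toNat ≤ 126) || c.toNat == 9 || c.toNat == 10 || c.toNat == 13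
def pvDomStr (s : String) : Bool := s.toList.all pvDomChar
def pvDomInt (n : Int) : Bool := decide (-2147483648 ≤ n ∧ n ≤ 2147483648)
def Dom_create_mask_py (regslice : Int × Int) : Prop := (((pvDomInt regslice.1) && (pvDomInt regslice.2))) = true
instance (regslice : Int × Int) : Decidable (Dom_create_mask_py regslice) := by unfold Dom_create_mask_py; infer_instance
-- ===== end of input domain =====

-- B replaces A's 32-iteration bit loop by a closed-form mask from the clamped window (objective: simpler).

-- ===== PORT A =====
def create_mask_py (regslice : Int × Int) : Int × Int :=
  let slice_start := regslice.2
  let slice_stop := regslice.1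
  let mask : Int := 0
  let mask := (PySem.List.pyRange 0 32 1).foldl
    (fun mask i => if slice_start ≤ i ∧ i ≤ slice_stop then PySem.Int.bor mask (1 <<< i.toNat) else mask) mask
  (mask, slice_start)

-- ===== PORT B =====
def create_mask_py_alt (regslice : Int × Int) : Int × Int :=
  let slice_start := regslice.2
  let slice_stop := regslice.1
  let lo := max slice_start 0
  let hi := min slice_stop 31
  let mask : Int := if hi < lo then 0 else ((1 <<< (hi - lo + 1).toNat) - 1) <<< lo.toNat
  (mask, slice_start)

-- ===== PRECONDITION & SPEC =====
def Spec_create_mask_py (regslice : Int × Int) (out : Int × Int) : Prop := out = create_mask_py_alt regslice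
instance (regslice : Int × Int) (out : Int × Int) : Decidable (Spec_create_mask_py regslice out) := by unfold Spec_create_mask_py; infer_instance

-- ===== CLAIM (what is proved, stated in full; the proofs are below) =====
def Claim_equal_create_mask_py : Prop := ∀ (regslice : Int × Int), Dom_create_mask_py regslice → Spec_create_mask_py regslice (create_mask_py regslice)

-- ===== LEMMAS AND PROOFS =====

-- A's loop, as a function of the two bounds (A's condition, A's fold).
def pvLoop (s t : Int) : Int :=
  (PySem.List.pyRange 0 32 1).foldl
    (fun mask i => if s ≤ i ∧ i ≤ t then PySem.Int.bor mask (1 <<< i.toNat) else mask) 0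

-- B's closed form, as a function of the two bounds.
def pvClosed (s t : Int) : Int :=
  if min t 31 < max s 0 then 0 else ((1 <<< (min t 31 - max s 0 + 1).toNat) - 1) <<< (max s 0).toNat

-- Clamping the bounds does not change which i ∈ [0,32) satisfy the loop's condition.
lemma pvLoop_clamp (s t : Int) :
    pvLoop s t = pvLoop (min (max s 0) 32) (min (max t (-1)) 31) := by
  unfold pvLoop
  apply PySem.List.foldl_congr_mem
  intro m i hi
  have h := PySem.List.mem_pyRange_one.1 hi
  by_cases hc : s ≤ i ∧ i ≤ t
  · rw [if_pos hc, if_pos (by omega)]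
  · rw [if_neg hc, if_neg (by omega)]

-- On the finite grid of clamped bounds the loop equals the closed form.
set_option maxRecDepth 100000 in
lemma pvLoop_eq_closed_grid :
    ∀ a ∈ Finset.Icc (0 : Int) 32, ∀ b ∈ Finset.Icc (-1 : Int) 31, pvLoop a b = pvClosed a b := by
  decide

-- The closed form is invariant under the same clamping.
lemma pvClosed_clamp (s t : Int) :
    pvClosed s t = pvClosed (min (max s 0) 32) (min (max t (-1)) 31) := by
  unfold pvClosed
  by_cases h : min t 31 < max s 0
  · rw [if_pos h, if_pos (by omega)]
  · rw [if_neg h, if_neg (by omega)]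
    have h1 : max (min (max s 0) 32) 0 = max s 0 := by omega
    have h2 : min (min (max t (-1)) 31) 31 = min t 31 := by omega
    rw [h1, h2]

lemma pvLoop_eq_closed (s t : Int) : pvLoop s t = pvClosed s t := by
  rw [pvLoop_clamp, pvClosed_clamp]
  exact pvLoop_eq_closed_grid _ (by rw [Finset.mem_Icc]; omega) _ (by rw [Finset.mem_Icc]; omega)

-- ===== VERDICT (by name: the statement is the Claim_ definition above) =====
theorem create_mask_py_spec : Claim_equal_create_mask_py := by
  intro r _
  unfold Spec_create_mask_py create_mask_py create_mask_py_alt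
  simp only []
  have := pvLoop_eq_closed r.2 r.1
  unfold pvLoop pvClosed at this
  exact Prod.ext (by simpa using this) rfl
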